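-- pv_equiv track=rewrite | github.com/hanepo/ai_violence_detection | scripts/sweep_vision_threshold.py | get_positive_index
-- ===== SOURCE A (Python) =====
-- def get_positive_index(class_names: list[str]) -> int:
--     # Match an explicit violent class name; avoid matching "non_violent".
--     preferred = {"violent", "violence", "fight", "aggressive"}
--     for i, name in enumerate(class_names):
--         normalized = name.lower().replace("-", "_").replace(" ", "_")
--         if normalized in preferred:
--             return i
--
--     for i, name in enumerate(class_names):
--         normalized = name.lower().replace("-", "_").replace(" ", "_")
--         if "non" in normalized and "violent" in normalized:
--             continue
--         if "violent" in normalized: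
--             return i
--     return 1
-- ===== SOURCE B (Python) =====
-- def get_positive_index(class_names: list[str]) -> int:
--     # Single pass: exact matches win immediately; first substring match kept as fallback.
--     preferred = {"violent", "violence", "fight", "aggressive"}
--     best = None
--     for i, name in enumerate(class_names):
--         norm = name.lower().replace("-", "_").replace(" ", "_")
--         if norm in preferred:
--             return i
--         if best is None and "violent" in norm and "non" not in norm:
--             best = i
--     return best if best is not None else 1
-- ===== Notes on version B (the rewrite author's own statement) =====
-- stated objective: simpler
-- what changed: Replaces A's two full passes over class_names by a single pass that normalizes each name once, returns immediately on an exact preferred-name match, and records the first 'violent'-substring (non-'non') index as a fallback returned after the loop.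
import Mathlib
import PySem

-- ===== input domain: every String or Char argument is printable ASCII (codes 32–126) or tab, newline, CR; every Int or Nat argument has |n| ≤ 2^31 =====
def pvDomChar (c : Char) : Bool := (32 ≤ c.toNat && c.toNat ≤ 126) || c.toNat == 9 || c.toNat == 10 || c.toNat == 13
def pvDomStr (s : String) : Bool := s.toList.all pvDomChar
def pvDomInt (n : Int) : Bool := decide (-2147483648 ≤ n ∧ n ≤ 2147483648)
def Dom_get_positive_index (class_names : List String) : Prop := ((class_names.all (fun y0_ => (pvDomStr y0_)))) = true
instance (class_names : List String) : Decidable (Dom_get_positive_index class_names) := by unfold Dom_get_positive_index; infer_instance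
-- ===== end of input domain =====

-- B replaces A's two full passes by ONE pass (each name normalized once): exact matches
-- return at once, the first substring match is recorded as a fallback returned after the loop.

-- ===== PORT A =====
-- normalized = name.lower().replace("-", "_").replace(" ", "_")
def pvNormA (name : String) : String :=
  PySem.Str.replace (PySem.Str.replace (PySem.Str.lower name) "-" "_") " " "_"

-- first loop of A: return first i with normalized in preferred
def pvLoopA1 (l : List String) (i : Int) : Option Int :=
  match l with
  | [] => none
  | name :: rest =>
    let normalized := pvNormA name
    if (PySem.Set.ofList ["violent", "violence", "fight", "aggressive"]).contains normalized then
      some i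
    else pvLoopA1 rest (i + 1)

-- second loop of A: skip "non"+"violent", return first i containing "violent"
def pvLoopA2 (l : List String) (i : Int) : Option Int :=
  match l with
  | [] => none
  | name :: rest =>
    let normalized := pvNormA name
    if PySem.Str.isIn "non" normalized && PySem.Str.isIn "violent" normalized then
      pvLoopA2 rest (i + 1)
    else if PySem.Str.isIn "violent" normalized then some i
    else pvLoopA2 rest (i + 1)

def get_positive_index (class_names : List String) : Int :=
  match pvLoopA1 class_names 0 with
  | some i => i
  | none =>
    match pvLoopA2 class_names 0 with
    | some i => i
    | none => 1

-- ===== PORT B =====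
-- single pass of Source B, carrying (index, best-fallback-so-far)
def pvScanB (l : List String) (i : Int) (best : Option Int) : Int :=
  match l with
  | [] => match best with | some b => b | none => 1
  | name :: rest =>
    let norm := pvNormA name
    if (PySem.Set.ofList ["violent", "violence", "fight", "aggressive"]).contains norm then i
    else
      let best' :=
        if best.isNone && PySem.Str.isIn "violent" norm && !PySem.Str.isIn "non" norm then
          some i
        else best
      pvScanB rest (i + 1) best'

def get_positive_index_alt (class_names : List String) : Int :=
  pvScanB class_names 0 none

-- ===== PRECONDITION & SPEC =====
def Spec_get_positive_index (class_names : List String) (out : Int) : Prop := out = get_positive_index_alt class_names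
instance (class_names : List String) (out : Int) : Decidable (Spec_get_positive_index class_names out) := by unfold Spec_get_positive_index; infer_instance

-- ===== CLAIM (what is proved, stated in full; the proofs are below) =====
def Claim_equal_get_positive_index : Prop := ∀ (class_names : List String), Dom_get_positive_index class_names → Spec_get_positive_index class_names (get_positive_index class_names)

-- ===== LEMMAS AND PROOFS =====

-- key invariant: the one-pass scan equals "first exact, else fallback, else first substring, else 1"
theorem pvScanB_eq (l : List String) : ∀ (i : Int) (best : Option Int),
    pvScanB l i best =
      match pvLoopA1 l i with
      | some j => j
      | none =>
        match best with
        | some b => b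
        | none =>
          match pvLoopA2 l i with
          | some j => j
          | none => 1 := by
  induction l with
  | nil => intro i best; rfl
  | cons name rest ih =>
    intro i best
    simp only [pvScanB, pvLoopA1, pvLoopA2]
    generalize pvNormA name = nm
    cases hex : (PySem.Set.ofList ["violent", "violence", "fight", "aggressive"]).contains nm with
    | true => simp only [if_true]
    | false =>
      simp only [Bool.false_eq_true, if_false, ih]
      cases best with
      | some b =>
        simp only [Option.isNone_some, Bool.false_and, Bool.false_eq_true, if_false]
      | none =>
        cases hv : PySem.Str.isIn "violent" nm with
        | false =>
          simp only [Option.isNone_none, Bool.false_and, Bool.and_false,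
            Bool.false_eq_true, if_false]
        | true =>
          cases hnn : PySem.Str.isIn "non" nm with
          | true =>
            simp only [Option.isNone_none, Bool.not_true, Bool.and_false,
              Bool.and_true, Bool.false_eq_true, if_false]
            simp
          | false =>
            simp only [Option.isNone_none, Bool.not_false, Bool.and_true, if_true]
            cases pvLoopA1 rest (i + 1) <;> rfl

theorem get_positive_index_eq (l : List String) :
    get_positive_index l = get_positive_index_alt l := by
  unfold get_positive_index get_positive_index_alt
  rw [pvScanB_eq]

-- ===== VERDICT (by name: the statement is the Claim_ definition above) =====
theorem get_positive_index_spec : Claim_equal_get_positive_index := by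
  intro l _
  unfold Spec_get_positive_index
  exact get_positive_index_eq l
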